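-- pv_equiv track=rewrite | github.com/TheoAnastasiadis/api-router-abstraction | bin/combinations.py | filter_duplicate_perms
-- ===== SOURCE A (Python) =====
-- from itertools import permutations
--
-- def filter_duplicate_perms(all_ways):
--     unique_ways = []
--     for way in all_ways:
--         for perm in permutations(way):
--             perm = [list(group) for group in perm]  # Convert tuples to lists
--             perm.sort()  # Sort each group of team members
--             if perm not in unique_ways:
--                 unique_ways.append(perm)
--
--     return unique_ways
-- ===== SOURCE B (Python) =====
-- def filter_duplicate_perms(all_ways):
--     # Two staged passes: canonicalise every way (all its permutations sort to the
--     # same representative), then dedupe recursively by filtering later duplicates.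
--     reps = [sorted([list(group) for group in way]) for way in all_ways]
--
--     def dedupe(ws):
--         if not ws:
--             return []
--         head = ws[0]
--         return [head] + dedupe([w for w in ws[1:] if w != head])
--
--     return dedupe(reps)
-- ===== Notes on version B (the rewrite author's own statement) =====
-- stated objective: faster
-- what changed: Drops the factorial enumeration of permutations: each way is sorted once to its canonical representative in one mapping pass, then a recursive filter-based dedupe keeps first occurrences, instead of A's nested fold with a membership test on the growing accumulator.
import Mathlib
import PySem

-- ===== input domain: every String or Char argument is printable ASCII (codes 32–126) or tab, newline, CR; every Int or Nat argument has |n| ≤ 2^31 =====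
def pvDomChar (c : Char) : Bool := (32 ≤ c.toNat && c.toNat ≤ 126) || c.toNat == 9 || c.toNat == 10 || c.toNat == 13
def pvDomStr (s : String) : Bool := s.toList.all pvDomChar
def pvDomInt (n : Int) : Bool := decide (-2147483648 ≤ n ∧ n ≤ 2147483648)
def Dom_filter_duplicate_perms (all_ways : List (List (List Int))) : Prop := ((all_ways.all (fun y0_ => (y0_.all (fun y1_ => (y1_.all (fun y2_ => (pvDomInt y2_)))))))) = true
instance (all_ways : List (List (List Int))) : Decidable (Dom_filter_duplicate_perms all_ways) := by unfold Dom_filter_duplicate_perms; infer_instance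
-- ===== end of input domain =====

-- B drops A's factorial permutation enumeration: one mapping pass sorts each way to its
-- canonical representative, then a recursive filter-based dedupe keeps first occurrences
-- (objective: faster, asymptotically).

-- Python's list-of-lists '<' is lexicographic = Mathlib's lexicographic LinearOrder on List Int;
-- the instance is pinned so the order lemmas apply (exact for Python's sort of lists of ints).
def pySortLL (xs : List (List Int)) : List (List Int) :=
  @PySem.List.sorted (List Int) (List Int) List.instLinearOrder.toLT LinearOrder.toDecidableLT xs (fun x => x) false

-- ===== PORT A =====
def filter_duplicate_perms (all_ways : List (List (List Int))) : List (List (List Int)) :=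
  all_ways.foldl (fun unique_ways way =>
    (PySem.List.permutations way way.length).foldl (fun unique_ways perm =>
      let perm1 := perm.map (fun group => group)   -- [list(group) for group in perm]
      let perm2 := pySortLL perm1                  -- perm.sort()
      if perm2 ∈ unique_ways then unique_ways else unique_ways ++ [perm2]) unique_ways) []

-- ===== PORT B =====
-- dedupe: keep the head, recurse on the tail with every copy of the head filtered out
def pvDedupe : List (List (List Int)) → List (List (List Int))
  | [] => []
  | head :: rest => head :: pvDedupe (rest.filter (fun w => w ≠ head))
termination_by l => l.length
decreasing_by
  simp only [List.length_cons, List.length_unattach, Nat.lt_succ_iff]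
  exact Nat.le_trans (List.length_filter_le _ _) (by simp)

def filter_duplicate_perms_alt (all_ways : List (List (List Int))) : List (List (List Int)) :=
  pvDedupe (all_ways.map (fun way => pySortLL (way.map (fun group => group))))

-- ===== PRECONDITION & SPEC =====
def Spec_filter_duplicate_perms (all_ways : List (List (List Int))) (out : List (List (List Int))) : Prop := out = filter_duplicate_perms_alt all_ways
instance (all_ways : List (List (List Int))) (out : List (List (List Int))) : Decidable (Spec_filter_duplicate_perms all_ways out) := by unfold Spec_filter_duplicate_perms; infer_instance

-- ===== CLAIM (what is proved, stated in full; the proofs are below) =====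
def Claim_equal_filter_duplicate_perms : Prop := ∀ (all_ways : List (List (List Int))), Dom_filter_duplicate_perms all_ways → Spec_filter_duplicate_perms all_ways (filter_duplicate_perms all_ways)

-- ===== LEMMAS AND PROOFS =====

-- permutations of the full length of a list is never empty
theorem perms_ne_nil {α : Type} : ∀ (n : Nat) (xs : List α), xs.length = n →
    PySem.List.permutations xs n ≠ [] := by
  intro n
  induction n with
  | zero => intro xs h; simp [PySem.List.permutations_zero]
  | succ n ih =>
    intro xs h
    match xs with
    | x :: t =>
      have ht : t.length = n := by simpa using h
      intro hcontra
      rw [PySem.List.permutations] at hcontra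
      rw [List.flatMap_eq_nil_iff] at hcontra
      have h0 := hcontra 0 (by simp)
      simp at h0
      exact ih t ht h0

-- sorting any full-length permutation of way gives the sort of way
theorem sort_perm_eq (way p : List (List Int))
    (hp : p ∈ PySem.List.permutations way way.length) :
    pySortLL (p.map (fun g => g)) = pySortLL (way.map (fun g => g)) := by
  simp only [List.map_id_fun', id]
  exact PySem.List.sorted_eq_sorted_of_perm p way (fun x => x) (fun a b h => h)
    (PySem.List.perm_of_mem_permutations hp)

-- folding a conditional-append of a constant value over a nonempty list does it once
theorem foldl_const_insert (s : List (List Int)) :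
    ∀ (l : List (List (List Int))) (acc : List (List (List Int))),
      (∀ p ∈ l, pySortLL (p.map (fun g => g)) = s) →
      l ≠ [] →
      l.foldl (fun acc p =>
          let perm1 := p.map (fun group => group)
          let perm2 := pySortLL perm1
          if perm2 ∈ acc then acc else acc ++ [perm2]) acc
        = if s ∈ acc then acc else acc ++ [s] := by
  intro l
  induction l with
  | nil => intro acc _ hne; exact absurd rfl hne
  | cons x t ih =>
    intro acc hall _
    have hx : pySortLL (x.map (fun g => g)) = s := hall x (by simp)
    simp only [List.foldl_cons, hx]
    by_cases ht : t = []
    · subst ht; simp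
    · rw [ih _ (fun p hp => hall p (by simp [hp])) ht]
      have hmem : s ∈ (if s ∈ acc then acc else acc ++ [s]) := by
        split <;> simp_all
      rw [if_pos hmem]

-- the membership-guarded foldl equals appending the filter-based dedupe of the new elements
theorem foldl_insert_eq_dedupe :
    ∀ (l acc : List (List (List Int))),
      l.foldl (fun acc s => if s ∈ acc then acc else acc ++ [s]) acc
        = acc ++ pvDedupe (l.filter (fun s => s ∉ acc)) := by
  intro l
  induction l with
  | nil => intro acc; simp [pvDedupe]
  | cons x t ih =>
    intro acc
    simp only [List.foldl_cons]
    by_cases hx : x ∈ acc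
    · rw [if_pos hx, ih]
      congr 2
      rw [List.filter_cons]
      simp [hx]
    · rw [if_neg hx, ih]
      have hfil : t.filter (fun s => s ∉ acc ++ [x])
          = (t.filter (fun s => s ∉ acc)).filter (fun s => s ≠ x) := by
        rw [List.filter_filter]
        apply List.filter_congr
        intro a _
        by_cases h1 : a = x <;> by_cases h2 : a ∈ acc <;> simp [h1, h2]
      rw [hfil]
      rw [List.filter_cons]
      simp only [hx, decide_not, decide_false, Bool.not_false, if_pos]
      rw [pvDedupe]
      simp

-- ===== VERDICT (by name: the statement is the Claim_ definition above) =====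
theorem filter_duplicate_perms_spec : Claim_equal_filter_duplicate_perms := by
  intro all_ways _
  unfold Spec_filter_duplicate_perms filter_duplicate_perms filter_duplicate_perms_alt
  have hA : all_ways.foldl (fun unique_ways way =>
      (PySem.List.permutations way way.length).foldl (fun unique_ways perm =>
        let perm1 := perm.map (fun group => group)
        let perm2 := pySortLL perm1
        if perm2 ∈ unique_ways then unique_ways else unique_ways ++ [perm2]) unique_ways) []
      = (all_ways.map (fun way => pySortLL (way.map (fun group => group)))).foldl
          (fun acc s => if s ∈ acc then acc else acc ++ [s]) [] := by
    rw [List.foldl_map]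
    apply List.foldl_ext
    intro acc way _
    exact foldl_const_insert (pySortLL (way.map (fun g => g)))
      (PySem.List.permutations way way.length) acc
      (fun p hp => sort_perm_eq way p hp)
      (perms_ne_nil way.length way rfl)
  rw [hA, foldl_insert_eq_dedupe]
  simp
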